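-- pv_equiv track=rewrite | github.com/tony102741/firmware_project | src/core/analyzer/dataflow.py | count_validation_messages
-- ===== SOURCE A (Python) =====
-- def count_validation_messages(strings):
--     """
--     Count strings that look like input validation error messages.
--
--     Patterns like "invalid IP address", "value out of range", or "bad parameter"
--     indicate the binary actively validates inputs before processing them.
--     High counts are a secondary sanitization signal used to boost the validation
--     penalty in risk.py — they show the developer was thinking about bad input.
--
--     Returns an int count of distinct validation message strings found.
--     """
--     _VALIDATION_MSG_HINTS = {
--         "invalid", "out of range", "bad value", "illegal",
--         "not valid", "must be", "too long", "too short",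
--         "out of bound", "exceeds", "check fail", "validation fail",
--         "invalid input", "invalid param", "invalid value", "invalid format",
--         "invalid ip", "invalid address", "address format",
--         "parameter error", "param error", "bad param", "wrong format",
--     }
--     count = 0
--     for s in strings:
--         l = s.lower()
--         if any(h in l for h in _VALIDATION_MSG_HINTS):
--             count += 1
--     return count
-- ===== SOURCE B (Python) =====
-- def count_validation_messages(strings):
--     # Naive multi-pattern matcher: scan each lowered string left to right and,
--     # at each position, try only the hints whose first character matches there
--     # (first-character dispatch table), instead of running 23 substring searches.
--     hints = [
--         "invalid", "out of range", "bad value", "illegal",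
--         "not valid", "must be", "too long", "too short",
--         "out of bound", "exceeds", "check fail", "validation fail",
--         "invalid input", "invalid param", "invalid value", "invalid format",
--         "invalid ip", "invalid address", "address format",
--         "parameter error", "param error", "bad param", "wrong format",
--     ]
--     table = {}
--     for h in hints:
--         table.setdefault(h[0], []).append(h)
--     count = 0
--     for s in strings:
--         l = s.lower()
--         hit = False
--         i = 0
--         while i < len(l) and not hit:
--             for h in table.get(l[i], ()):
--                 if l.startswith(h, i):
--                     hit = True
--                     break
--             i += 1
--         if hit:
--             count += 1
--     return count
-- ===== Notes on version B (the rewrite author's own statement) =====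
-- stated objective: alternative
-- what changed: B replaces A's per-string any() over 23 independent substring searches with a naive multi-pattern matcher: one left-to-right scan of each lowered string that, at every position, tries only the hints listed in a precomputed first-character dispatch table.
import Mathlib
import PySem

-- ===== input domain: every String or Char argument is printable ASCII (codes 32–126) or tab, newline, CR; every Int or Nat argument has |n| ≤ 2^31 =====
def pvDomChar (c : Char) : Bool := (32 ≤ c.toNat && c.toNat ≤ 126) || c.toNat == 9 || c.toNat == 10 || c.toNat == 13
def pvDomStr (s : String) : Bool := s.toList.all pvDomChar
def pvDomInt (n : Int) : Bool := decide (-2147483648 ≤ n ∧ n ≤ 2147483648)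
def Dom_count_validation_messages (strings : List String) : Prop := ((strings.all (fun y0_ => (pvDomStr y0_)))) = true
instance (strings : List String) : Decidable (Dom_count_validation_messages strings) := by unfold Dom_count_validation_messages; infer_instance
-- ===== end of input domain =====

-- B replaces A's 23 substring searches per string by one left-to-right scan of the
-- lowered string with a first-character dispatch table (naive multi-pattern matcher);
-- objective: alternative algorithm, same result.

-- ===== PORT A =====
-- Python set literal of the 23 hints (PySem.Set; all distinct)
def pvHintsA : List String := PySem.Set.ofList
  [ "invalid", "out of range", "bad value", "illegal",
    "not valid", "must be", "too long", "too short",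
    "out of bound", "exceeds", "check fail", "validation fail",
    "invalid input", "invalid param", "invalid value", "invalid format",
    "invalid ip", "invalid address", "address format",
    "parameter error", "param error", "bad param", "wrong format" ]

def count_validation_messages (strings : List String) : Int :=
  strings.foldl (fun count s =>
    let l := PySem.Str.lower s
    if pvHintsA.any (fun h => PySem.Str.isIn h l) then count + 1 else count) 0

-- ===== PORT B =====
def pvHintsB : List String :=
  [ "invalid", "out of range", "bad value", "illegal",
    "not valid", "must be", "too long", "too short",
    "out of bound", "exceeds", "check fail", "validation fail",
    "invalid input", "invalid param", "invalid value", "invalid format",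
    "invalid ip", "invalid address", "address format",
    "parameter error", "param error", "bad param", "wrong format" ]

-- table.setdefault(h[0], []).append(h)  — first-character dispatch table
def pvTable : PySem.Dict Char (List String) :=
  pvHintsB.foldl (fun d h =>
    match h.toList with
    | [] => d          -- unreachable: every hint is nonempty (h[0] would raise)
    | c :: _ => d.modify c [] (fun v => v ++ [h])) PySem.Dict.empty

-- the while loop over positions i of l, breaking as soon as a hint matches
def pvScan : List Char → Bool
  | [] => false
  | c :: rest =>
      (pvTable.getD c []).any (fun h => h.toList.isPrefixOf (c :: rest)) || pvScan rest

def count_validation_messages_alt (strings : List String) : Int :=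
  strings.foldl (fun count s =>
    if pvScan (PySem.Str.lower s).toList then count + 1 else count) 0

-- ===== PRECONDITION & SPEC =====
def Spec_count_validation_messages (strings : List String) (out : Int) : Prop := out = count_validation_messages_alt strings
instance (strings : List String) (out : Int) : Decidable (Spec_count_validation_messages strings out) := by unfold Spec_count_validation_messages; infer_instance

-- ===== CLAIM (what is proved, stated in full; the proofs are below) =====
def Claim_equal_count_validation_messages : Prop := ∀ (strings : List String), Dom_count_validation_messages strings → Spec_count_validation_messages strings (count_validation_messages strings)

-- ===== LEMMAS AND PROOFS =====

theorem pv_any_congr_mem {α : Type} (l : List α) (p q : α → Bool)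
    (h : ∀ a ∈ l, p a = q a) : l.any p = l.any q := by
  induction l with
  | nil => simp
  | cons a t ih => simp [h a (by simp), ih (fun a ha => h a (by simp [ha]))]

theorem pv_any_or {α : Type} (l : List α) (p q : α → Bool) :
    (l.any fun x => p x || q x) = (l.any p || l.any q) := by
  induction l with
  | nil => simp
  | cons a t ih =>
    simp only [List.any_cons, ih]
    cases p a <;> cases q a <;> simp

theorem pvHints_nonempty : ∀ h ∈ pvHintsB, h.toList ≠ [] := by decide

theorem pvHintsA_eq : pvHintsA = pvHintsB := by decide

-- the dispatch table bucket of a character c is exactly the hints starting with c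
theorem pvTable_getD (c : Char) :
    pvTable.getD c [] = pvHintsB.filter (fun h => h.toList.headD ' ' == c) := by
  have h1 : pvTable =
      (pvHintsB.map (fun h => (h.toList.headD ' ', h))).foldl
        (fun d p => d.modify p.1 [] (fun v => v ++ [p.2])) PySem.Dict.empty := by
    unfold pvTable
    rw [List.foldl_map]
    apply PySem.List.foldl_congr_mem
    intro d h hm
    rcases hl : h.toList with _ | ⟨a, t⟩
    · exact absurd hl (pvHints_nonempty h hm)
    · simp
  rw [h1, PySem.Dict.getD_foldl_modify_append, PySem.Dict.getD_empty]
  rw [List.filter_map]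
  simp [Function.comp_def]

theorem pv_prefix_head (hl : List Char) (hne : hl ≠ []) (c : Char) (rest : List Char) :
    ((hl.headD ' ' == c) && hl.isPrefixOf (c :: rest)) = hl.isPrefixOf (c :: rest) := by
  rcases hl with _ | ⟨a, t⟩
  · exact absurd rfl hne
  · simp only [List.headD_cons, List.isPrefixOf]
    by_cases h : a = c <;> simp [h]

-- at each position, trying only the bucket of the current character suffices
theorem pvScan_cons_any (c : Char) (rest : List Char) :
    (pvTable.getD c []).any (fun h => h.toList.isPrefixOf (c :: rest))
      = pvHintsB.any (fun h => h.toList.isPrefixOf (c :: rest)) := by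
  rw [pvTable_getD, List.any_filter]
  apply pv_any_congr_mem
  intro h hm
  exact pv_prefix_head h.toList (pvHints_nonempty h hm) c rest

-- the position scan decides "some hint is an infix"
theorem pvScan_eq (l : List Char) :
    pvScan l = pvHintsB.any (fun h => decide (h.toList <:+: l)) := by
  induction l with
  | nil =>
    simp only [pvScan]
    symm
    rw [List.any_eq_false]
    intro h hm
    simp [List.infix_nil, pvHints_nonempty h hm]
  | cons c rest ih =>
    simp only [pvScan, pvScan_cons_any, ih]
    rw [← pv_any_or]
    apply pv_any_congr_mem
    intro h _
    rw [Bool.eq_iff_iff]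
    simp [List.infix_cons_iff, List.isPrefixOf_iff_prefix]

theorem pv_pred_eq (s : String) :
    pvHintsA.any (fun h => PySem.Str.isIn h (PySem.Str.lower s))
      = pvScan (PySem.Str.lower s).toList := by
  rw [pvScan_eq, pvHintsA_eq]
  apply pv_any_congr_mem
  intro h _
  rw [Bool.eq_iff_iff, PySem.Str.isIn_iff_infix, decide_eq_true_iff]

-- ===== VERDICT (by name: the statement is the Claim_ definition above) =====
theorem count_validation_messages_spec : Claim_equal_count_validation_messages := by
  intro strings _
  show _ = _
  unfold count_validation_messages count_validation_messages_alt
  simp only [pv_pred_eq]
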